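-- pv_equiv track=rewrite | github.com/keiJQK/google-search-official-url-selector | public/src/google_search_usecase.py | generate_name_patterns
-- ===== SOURCE A (Python) =====
-- import logging, itertools
--
-- def generate_name_patterns(main_word):
--     '''
--     company name: Nice Restaurant
--     -> For evaluation of URL, create name pattern like [nice-restaurant, nice_restaurant, nicerestaurant]
--     '''
--     name_patterns = []
--
--     # Check if company name is one single word
--     parts = main_word.lower().split()
--     if len(parts) == 1:
--         name_patterns = parts
--         return name_patterns
--
--     # Create name patters of company name with 2+ words
--     connectors = ['-', '_', '']
--
--     for combo in itertools.product(connectors, repeat=len(parts) - 1):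
--         joined = ''.join(p + c for p, c in zip(parts, combo)) + parts[-1]
--         name_patterns.append(joined)
--     return name_patterns
-- ===== SOURCE B (Python) =====
-- def generate_name_patterns(main_word):
--     parts = main_word.lower().split()
--     if len(parts) == 1:
--         return parts
--     acc = [parts[0]]
--     for p in parts[1:]:
--         acc = [a + c + p for a in acc for c in ['-', '_', '']]
--     return acc
-- ===== Notes on version B (the rewrite author's own statement) =====
-- stated objective: alternative
-- what changed: Replaces itertools.product over connector tuples followed by a zip-join with an incremental left fold that extends every accumulated prefix with each connector and the next word.
import Mathlib
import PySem

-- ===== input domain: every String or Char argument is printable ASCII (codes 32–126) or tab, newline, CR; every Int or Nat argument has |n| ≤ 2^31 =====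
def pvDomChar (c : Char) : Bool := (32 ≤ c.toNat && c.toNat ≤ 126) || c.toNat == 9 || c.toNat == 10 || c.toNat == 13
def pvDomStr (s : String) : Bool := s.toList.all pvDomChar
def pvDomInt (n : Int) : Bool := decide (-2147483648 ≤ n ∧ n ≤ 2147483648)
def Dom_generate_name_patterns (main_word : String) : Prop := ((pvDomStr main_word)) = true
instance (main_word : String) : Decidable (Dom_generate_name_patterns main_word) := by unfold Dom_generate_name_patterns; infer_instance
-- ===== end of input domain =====

-- B replaces itertools.product + zip-join with an incremental fold extending each prefix by each connector (alternative decomposition, same cost); equivalence is about return values (neither mutates).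

-- ===== PORT A =====
-- itertools.product(['-','_',''], repeat=n), tuples in Python's order (first coordinate varies slowest)
def pyProductConn : Nat → List (List String)
  | 0 => [[]]
  | n+1 => ["-", "_", ""].flatMap (fun c => (pyProductConn n).map (fun rest => c :: rest))

def generate_name_patterns (main_word : String) : List String :=
  let parts := PySem.Str.split₀ (PySem.Str.lower main_word)
  if parts.length == 1 then parts
  else
    -- for combo in product(...): name_patterns.append(''.join(p + c for p, c in zip(parts, combo)) + parts[-1])
    (pyProductConn (parts.length - 1)).foldl
      (fun acc combo =>
        acc ++ [PySem.Str.join "" ((parts.zip combo).map (fun pc => pc.1 ++ pc.2))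
                  ++ (PySem.List.pyGet? parts (-1)).getD ""])
      []

-- ===== PORT B =====
def generate_name_patterns_alt (main_word : String) : List String :=
  let parts := PySem.Str.split₀ (PySem.Str.lower main_word)
  if parts.length == 1 then parts
  else
    match parts with
    | [] => []  -- Python B raises IndexError at parts[0]; excluded by Pre_
    | p :: rest =>
      rest.foldl (fun acc q => acc.flatMap (fun a => ["-", "_", ""].map (fun c => a ++ c ++ q))) [p]

-- ===== PRECONDITION & SPEC =====
-- Pre_ excludes exactly the inputs whose lowercased whitespace-split is empty (whitespace-only strings),
-- where Python A raises ValueError (itertools.product with repeat = -1).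
def Pre_generate_name_patterns (main_word : String) : Prop :=
  PySem.Str.split₀ (PySem.Str.lower main_word) ≠ []
instance (main_word : String) : Decidable (Pre_generate_name_patterns main_word) := by
  unfold Pre_generate_name_patterns; infer_instance

def pvWitness_generate_name_patterns : String := "Nice Restaurant"

def Spec_generate_name_patterns (main_word : String) (out : List String) : Prop := out = generate_name_patterns_alt main_word
instance (main_word : String) (out : List String) : Decidable (Spec_generate_name_patterns main_word out) := by unfold Spec_generate_name_patterns; infer_instance

-- ===== CLAIM (what is proved, stated in full; the proofs are below) =====
def Claim_equal_generate_name_patterns : Prop := ∀ (main_word : String), Dom_generate_name_patterns main_word → Pre_generate_name_patterns main_word → Spec_generate_name_patterns main_word (generate_name_patterns main_word)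

-- ===== LEMMAS AND PROOFS =====

-- the common recursive shape both ports compute: all connector-joined patterns with accumulated prefix `a`
def pats (a : String) : List String → List String
  | [] => [a]
  | q :: rest => ["-", "_", ""].flatMap (fun c => pats (a ++ c ++ q) rest)

theorem pats_prefix (tail : List String) : ∀ (x a : String),
    (pats a tail).map (fun s => x ++ s) = pats (x ++ a) tail := by
  induction tail with
  | nil => intro x a; simp [pats]
  | cons q rest ih =>
    intro x a
    simp only [pats, List.map_flatMap]
    refine List.flatMap_congr ?_
    intro c _
    rw [ih x (a ++ c ++ q)]
    simp [String.append_assoc]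

-- B's fold in terms of pats
theorem foldB_eq (tail : List String) : ∀ (acc : List String),
    tail.foldl (fun acc q => acc.flatMap (fun a => ["-", "_", ""].map (fun c => a ++ c ++ q))) acc
      = acc.flatMap (fun a => pats a tail) := by
  induction tail with
  | nil => intro acc; simp [pats]
  | cons q rest ih =>
    intro acc
    simp only [List.foldl_cons, ih, List.flatMap_assoc]
    refine List.flatMap_congr ?_
    intro a _
    simp [pats]

-- join with empty separator peels its head
theorem join_empty_cons (s : String) (L : List String) :
    PySem.Str.join "" (s :: L) = s ++ PySem.Str.join "" L := by
  apply String.toList_inj.mp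
  cases L <;> simp [PySem.Chars.join, List.intercalate]

theorem join_empty_nil : PySem.Str.join "" ([] : List String) = "" := by
  apply String.toList_inj.mp
  simp [PySem.Chars.join, List.intercalate]

theorem glast_cons (p q : String) (rest : List String) :
    (PySem.List.pyGet? (p :: q :: rest) (-1)).getD "" = (PySem.List.pyGet? (q :: rest) (-1)).getD "" := by
  simp [PySem.List.pyGet?, PySem.List.pyIdx?, List.getElem?_cons]

theorem glast_one (p : String) : (PySem.List.pyGet? [p] (-1)).getD "" = p := by
  simp [PySem.List.pyGet?, PySem.List.pyIdx?]

-- A's product-then-join equals pats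
theorem prodA_eq (tail : List String) : ∀ (p : String),
    (pyProductConn tail.length).map
      (fun combo => PySem.Str.join "" (((p :: tail).zip combo).map (fun pc => pc.1 ++ pc.2))
          ++ (PySem.List.pyGet? (p :: tail) (-1)).getD "")
      = pats p tail := by
  induction tail with
  | nil =>
    intro p
    simp [pyProductConn, pats, join_empty_nil, glast_one]
  | cons q rest ih =>
    intro p
    simp only [List.length_cons, pyProductConn, List.map_flatMap, pats]
    refine List.flatMap_congr ?_
    intro c _
    have step :
        List.map
          (fun combo => PySem.Str.join "" (((p :: q :: rest).zip combo).map (fun pc => pc.1 ++ pc.2))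
              ++ (PySem.List.pyGet? (p :: q :: rest) (-1)).getD "")
          ((pyProductConn rest.length).map (fun r => c :: r))
        = ((pyProductConn rest.length).map
            (fun combo => PySem.Str.join "" (((q :: rest).zip combo).map (fun pc => pc.1 ++ pc.2))
                ++ (PySem.List.pyGet? (q :: rest) (-1)).getD "")).map (fun s => (p ++ c) ++ s) := by
      rw [List.map_map, List.map_map]
      refine List.map_congr_left ?_
      intro combo _
      simp [Function.comp, join_empty_cons, glast_cons, String.append_assoc]
    rw [step, ih q, pats_prefix]

-- A's append-fold is a map
theorem foldA_eq {α β : Type} (L : List α) (f : α → β) : ∀ (init : List β),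
    L.foldl (fun acc x => acc ++ [f x]) init = init ++ L.map f := by
  induction L with
  | nil => intro init; simp
  | cons x xs ih => intro init; simp [ih]

-- ===== VERDICT (by name: the statement is the Claim_ definition above) =====
theorem generate_name_patterns_spec : Claim_equal_generate_name_patterns := by
  intro main_word _ hpre
  unfold Spec_generate_name_patterns
  unfold Pre_generate_name_patterns at hpre
  simp only [generate_name_patterns, generate_name_patterns_alt]
  cases hp : PySem.Str.split₀ (PySem.Str.lower main_word) with
  | nil => exact absurd hp hpre
  | cons p tail =>
    by_cases hl : (p :: tail).length = 1
    · simp [hl]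
    · have hl' : ((p :: tail).length == 1) = false := by simpa using hl
      simp only [hl', Bool.false_eq_true, if_false]
      rw [foldA_eq, List.nil_append, foldB_eq]
      simp only [List.flatMap_cons, List.flatMap_nil, List.append_nil,
        List.length_cons, Nat.add_sub_cancel]
      exact prodA_eq tail p
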